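-- pv_equiv track=rewrite | github.com/Runarok/GeeksForGeeks-solutions | Difficulty: Easy/Nth number made of prime digits/nth-number-made-of-prime-digits.py | primeDigits
-- ===== SOURCE A (Python) =====
-- def primeDigits(n):
--     # Prime digits to form the numbers
--     prime_digits = ['2', '3', '5', '7']
--
--     # Initialize a queue with prime digits
--     queue = prime_digits[:]
--
--     # Generate numbers until we reach the nth number
--     for _ in range(n - 1):
--         num = queue.pop(0)  # Take the front of the queue
--         for digit in prime_digits:
--             queue.append(num + digit)  # Append new numbers formed by adding prime digits
--
--     return queue[0]  # The nth number will be the front of the queue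
-- ===== SOURCE B (Python) =====
-- def primeDigits(n):
--     # Bijective base-4 numeral of n over the digit alphabet "2357" (O(log n)).
--     res = ""
--     m = n
--     while m > 0:
--         m -= 1
--         res = "2357"[m % 4] + res
--         m //= 4
--     return res
-- ===== Notes on version B (the rewrite author's own statement) =====
-- stated objective: faster
-- what changed: Replaced the BFS queue that enumerates all first n numbers (popping and appending 4 children per step) by a direct bijective base-4 conversion of n onto the digit alphabet '2357'.
-- outside the precondition, e.g. on primeDigits(0): A returns '2', B returns ''
import Mathlib
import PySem

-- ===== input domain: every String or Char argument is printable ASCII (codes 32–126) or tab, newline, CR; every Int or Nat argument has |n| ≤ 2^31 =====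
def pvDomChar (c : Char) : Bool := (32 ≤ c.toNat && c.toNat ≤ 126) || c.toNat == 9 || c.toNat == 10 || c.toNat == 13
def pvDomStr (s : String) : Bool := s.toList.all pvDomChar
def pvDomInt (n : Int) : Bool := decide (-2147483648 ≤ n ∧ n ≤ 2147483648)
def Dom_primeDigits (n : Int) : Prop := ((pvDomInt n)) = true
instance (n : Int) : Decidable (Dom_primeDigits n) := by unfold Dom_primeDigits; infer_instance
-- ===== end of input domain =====

-- B replaces A's BFS queue enumeration of the first n prime-digit numbers by a direct
-- bijective base-4 conversion of n over the alphabet "2357" (strings handled as their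
-- character lists, wrapped with String.ofList at the end — exact for these ASCII literals).

-- ===== PORT A =====
-- one loop body: num = queue.pop(0); for digit in prime_digits: queue.append(num + digit)
def pdStepA (q : List (List Char)) : List (List Char) :=
  match q with
  | [] => []   -- unreachable: the Python queue is never empty
  | num :: rest => rest ++ [num ++ ['2'], num ++ ['3'], num ++ ['5'], num ++ ['7']]

-- for _ in range(n - 1): … ; return queue[0]   (range(n-1) runs (n-1).toNat times)
def primeDigits (n : Int) : String :=
  String.ofList (((List.range (n - 1).toNat).foldl (fun q _ => pdStepA q)
      [['2'], ['3'], ['5'], ['7']]).headD [])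

-- ===== PORT B =====
-- while m > 0: m -= 1; res = "2357"[m % 4] + res; m //= 4   (m stays ≥ 0, so recursion on m.toNat)
def pdLoopB : Nat → List Char → List Char
  | 0, res => res
  | m + 1, res => pdLoopB (m / 4) ((['2', '3', '5', '7'].getD (m % 4) '2') :: res)
  decreasing_by exact Nat.lt_succ_of_le (Nat.div_le_self m 4)

def primeDigits_alt (n : Int) : String := String.ofList (pdLoopB n.toNat [])

-- ===== PRECONDITION & SPEC =====
-- Pre_ excludes n ≤ 0, where no nth prime-digit number exists and neither behaviour is specified:
-- A happens to return "2" (the leftover front of its initial queue) and B returns "" (the empty numeral).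
def Pre_primeDigits (n : Int) : Prop := 1 ≤ n
instance (n : Int) : Decidable (Pre_primeDigits n) := by unfold Pre_primeDigits; infer_instance

def pvWitness_primeDigits : Int := 5

def Spec_primeDigits (n : Int) (out : String) : Prop := out = primeDigits_alt n
instance (n : Int) (out : String) : Decidable (Spec_primeDigits n out) := by unfold Spec_primeDigits; infer_instance

-- ===== CLAIM (what is proved, stated in full; the proofs are below) =====
def Claim_equal_primeDigits : Prop := ∀ (n : Int), Dom_primeDigits n → Pre_primeDigits n → Spec_primeDigits n (primeDigits n)

-- ===== LEMMAS AND PROOFS =====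

-- B's numeral function on Nat
def pdB (m : Nat) : List Char := pdLoopB m []

lemma pdLoopB_succ (m : Nat) (res : List Char) :
    pdLoopB (m + 1) res = pdLoopB (m / 4) ((['2', '3', '5', '7'].getD (m % 4) '2') :: res) := by
  rw [pdLoopB.eq_def]

lemma pdLoopB_acc (m : Nat) : ∀ res, pdLoopB m res = pdB m ++ res := by
  induction m using Nat.strong_induction_on with
  | _ m ih =>
    intro res
    match m with
    | 0 => simp [pdLoopB, pdB]
    | m + 1 =>
      have hlt : m / 4 < m + 1 := Nat.lt_succ_of_le (Nat.div_le_self m 4)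
      unfold pdB
      rw [pdLoopB_succ, ih _ hlt, pdLoopB_succ, ih _ hlt]
      simp

lemma pdB_child (m i : Nat) (hi : i < 4) :
    pdB (4 * (m + 1) + 1 + i) = pdB (m + 1) ++ [['2', '3', '5', '7'].getD i '2'] := by
  have h1 : 4 * (m + 1) + 1 + i = (4 * m + 4 + i) + 1 := by omega
  have h2 : (4 * m + 4 + i) / 4 = m + 1 := by omega
  have h3 : (4 * m + 4 + i) % 4 = i := by omega
  unfold pdB
  rw [h1, pdLoopB_succ, h2, h3, pdLoopB_acc]
  rfl

-- A's queue after k loop iterations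
def qk (k : Nat) : List (List Char) := (List.range' (k + 1) (3 * k + 4)).map pdB

lemma step_qk (k : Nat) : pdStepA (qk k) = qk (k + 1) := by
  have hcons : List.range' (k + 1) (3 * k + 4) = (k + 1) :: List.range' (k + 2) (3 * k + 3) := by
    rw [show 3 * k + 4 = 3 * k + 3 + 1 by omega, List.range'_succ]
  have hsplit : List.range' (k + 2) (3 * (k + 1) + 4) =
      List.range' (k + 2) (3 * k + 3) ++ List.range' ((k + 2) + (3 * k + 3)) 4 := by
    rw [show 3 * (k + 1) + 4 = (3 * k + 3) + 4 by omega]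
    exact (List.range'_append_1 ..).symm
  have e0 : pdB (4 * (k + 1) + 1 + 0) = pdB (k + 1) ++ ['2'] := pdB_child k 0 (by omega)
  have e1 : pdB (4 * (k + 1) + 1 + 1) = pdB (k + 1) ++ ['3'] := pdB_child k 1 (by omega)
  have e2 : pdB (4 * (k + 1) + 1 + 2) = pdB (k + 1) ++ ['5'] := pdB_child k 2 (by omega)
  have e3 : pdB (4 * (k + 1) + 1 + 3) = pdB (k + 1) ++ ['7'] := pdB_child k 3 (by omega)
  unfold qk
  rw [hcons, hsplit]
  simp only [List.map_cons, List.map_append, pdStepA]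
  congr 1
  rw [show (k + 2) + (3 * k + 3) = 4 * k + 5 by omega,
      show List.range' (4 * k + 5) 4 = [4 * k + 5, 4 * k + 6, 4 * k + 7, 4 * k + 8] by
        simp [List.range'_succ]]
  simp only [List.map_cons, List.map_nil]
  rw [show 4 * k + 5 = 4 * (k + 1) + 1 + 0 by omega, show 4 * k + 6 = 4 * (k + 1) + 1 + 1 by omega,
      show 4 * k + 7 = 4 * (k + 1) + 1 + 2 by omega, show 4 * k + 8 = 4 * (k + 1) + 1 + 3 by omega,
      e0, e1, e2, e3]

lemma pdB_base : pdB 1 = ['2'] ∧ pdB 2 = ['3'] ∧ pdB 3 = ['5'] ∧ pdB 4 = ['7'] := by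
  refine ⟨?_, ?_, ?_, ?_⟩ <;> simp [pdB, pdLoopB]

lemma foldl_qk (N : Nat) :
    (List.range N).foldl (fun q _ => pdStepA q) [['2'], ['3'], ['5'], ['7']] = qk N := by
  induction N with
  | zero =>
    obtain ⟨h1, h2, h3, h4⟩ := pdB_base
    simp [qk, List.range'_succ, h1, h2, h3, h4]
  | succ N ih =>
    rw [List.range_succ, List.foldl_append, ih, List.foldl_cons, List.foldl_nil, step_qk]

lemma primeDigits_eq (n : Int) : primeDigits n = String.ofList (pdB ((n - 1).toNat + 1)) := by
  unfold primeDigits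
  rw [foldl_qk]
  unfold qk
  rw [show 3 * (n - 1).toNat + 4 = 3 * (n - 1).toNat + 3 + 1 by omega, List.range'_succ]
  simp

-- ===== VERDICT (by name: the statement is the Claim_ definition above) =====
theorem primeDigits_spec : Claim_equal_primeDigits := by
  intro n _ hD
  unfold Pre_primeDigits at hD
  unfold Spec_primeDigits
  rw [primeDigits_eq]
  unfold primeDigits_alt
  rw [show (n - 1).toNat + 1 = n.toNat by omega]
  rfl
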